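-- pv_equiv track=rewrite | github.com/kyungminlee/fortran-migrator | scripts/mumps_sweep_keep_kind_calls.py | continuation_ranges
-- ===== SOURCE A (Python) =====
-- def continuation_ranges(lines: list[str]) -> list[tuple[int, int]]:
--     """Return a list of (start, end) 1-based line ranges where each
--     range corresponds to a single logical statement (starting a
--     statement, plus any continuation lines marked with ``&`` in col 6)."""
--     ranges: list[tuple[int, int]] = []
--     i = 0
--     n = len(lines)
--     while i < n:
--         start = i
--         # Advance through following continuation lines: in fixed-form
--         # Fortran, a continuation line has a non-blank, non-zero char in
--         # column 6 (1-based). The first line of a statement has a blank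
--         # there.
--         end = i
--         while end + 1 < n:
--             nxt = lines[end + 1]
--             if (len(nxt) >= 6 and nxt[5] not in (' ', '0', '\t')
--                     and (not nxt or nxt[0] not in ('C', 'c', '*'))):
--                 end += 1
--             else:
--                 break
--         ranges.append((start + 1, end + 1))  # 1-based
--         i = end + 1
--     return ranges
-- ===== SOURCE B (Python) =====
-- def continuation_ranges(lines: list[str]) -> list[tuple[int, int]]:
--     """Two-phase version: collect statement-start indices, then pair
--     consecutive starts into 1-based (start, end) ranges."""
--     n = len(lines)
--     if n == 0:
--         return []
--
--     def is_cont(s: str) -> bool: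
--         return (len(s) >= 6 and s[5] not in (' ', '0', '\t')
--                 and s[0] not in ('C', 'c', '*'))
--
--     starts = [0] + [j for j in range(1, n) if not is_cont(lines[j])]
--     ends = starts[1:] + [n]
--     return [(s + 1, e) for s, e in zip(starts, ends)]
-- ===== Notes on version B (the rewrite author's own statement) =====
-- stated objective: alternative
-- what changed: Replaced A's nested while loops (outer over statements, inner advancing through continuations) by a two-phase decomposition: one pass collects the 0-based statement-start indices, then a pairing pass zips consecutive starts into 1-based (start, end) ranges.
import Mathlib
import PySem

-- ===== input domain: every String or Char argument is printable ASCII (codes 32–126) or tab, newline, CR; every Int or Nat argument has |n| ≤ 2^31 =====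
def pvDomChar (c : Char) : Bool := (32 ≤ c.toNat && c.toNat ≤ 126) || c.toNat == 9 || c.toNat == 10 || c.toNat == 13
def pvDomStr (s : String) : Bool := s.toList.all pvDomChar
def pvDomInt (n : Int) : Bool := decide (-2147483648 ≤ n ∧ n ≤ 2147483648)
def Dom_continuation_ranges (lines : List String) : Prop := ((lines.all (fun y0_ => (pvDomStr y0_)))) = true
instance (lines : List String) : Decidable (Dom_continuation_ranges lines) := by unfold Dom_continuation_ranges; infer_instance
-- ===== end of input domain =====

-- B replaces A's nested while loops (outer over statements, inner over continuations) by a two-phase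
-- decomposition: collect the statement-start indices, then pair consecutive starts (objective: alternative).

-- ===== PORT A =====
-- the continuation-line test from A's inner loop condition
-- (indices 5 and 0 are only read under the `len ≥ 6` guard, so the getD defaults are never used)
def isContA (nxt : String) : Bool :=
  let cs := nxt.toList
  decide (cs.length ≥ 6) &&
    !(cs.getD 5 ' ' == ' ' || cs.getD 5 ' ' == '0' || cs.getD 5 ' ' == '\t') &&
    (cs.isEmpty || !(cs.getD 0 ' ' == 'C' || cs.getD 0 ' ' == 'c' || cs.getD 0 ' ' == '*'))

-- A's inner while loop, advancing `e` through continuation lines; `fuel = lines.length` makes the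
-- recursion structural and is never exhausted (each step needs e + 1 < lines.length)
def crA_inner (lines : List String) (fuel e : Nat) : Nat :=
  match fuel with
  | 0 => e
  | f + 1 =>
    if e + 1 < lines.length then
      if isContA (lines.getD (e + 1) "") then crA_inner lines f (e + 1) else e
    else e

-- A's outer while loop, again with fuel = lines.length (each iteration advances i by at least 1)
def crA_outer (lines : List String) (fuel i : Nat) : List (Int × Int) :=
  match fuel with
  | 0 => []
  | f + 1 =>
    if i < lines.length then
      let e := crA_inner lines lines.length i
      ((i : Int) + 1, (e : Int) + 1) :: crA_outer lines f (e + 1)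
    else []

def continuation_ranges (lines : List String) : List (Int × Int) :=
  crA_outer lines lines.length 0

-- ===== PORT B =====
-- B's is_cont helper (indices read only under the `len ≥ 6` guard)
def isContB (s : String) : Bool :=
  let cs := s.toList
  decide (cs.length ≥ 6) &&
    !(cs.getD 5 ' ' == ' ' || cs.getD 5 ' ' == '0' || cs.getD 5 ' ' == '\t') &&
    !(cs.getD 0 ' ' == 'C' || cs.getD 0 ' ' == 'c' || cs.getD 0 ' ' == '*')

def continuation_ranges_alt (lines : List String) : List (Int × Int) :=
  let n := lines.length
  if n = 0 then []
  else
    let starts := 0 :: (List.range' 1 (n - 1)).filter (fun j => !isContB (lines.getD j ""))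
    let ends := starts.tail ++ [n]
    (starts.zip ends).map (fun p => ((p.1 : Int) + 1, (p.2 : Int)))

-- ===== PRECONDITION & SPEC =====
def Spec_continuation_ranges (lines : List String) (out : List (Int × Int)) : Prop := out = continuation_ranges_alt lines
instance (lines : List String) (out : List (Int × Int)) : Decidable (Spec_continuation_ranges lines out) := by unfold Spec_continuation_ranges; infer_instance

-- ===== CLAIM (what is proved, stated in full; the proofs are below) =====
def Claim_equal_continuation_ranges : Prop := ∀ (lines : List String), Dom_continuation_ranges lines → Spec_continuation_ranges lines (continuation_ranges lines)

-- ===== LEMMAS AND PROOFS =====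

theorem isContA_eq_isContB (s : String) : isContA s = isContB s := by
  unfold isContA isContB
  by_cases h : s.toList.length ≥ 6
  · have hne : ¬ s.toList.isEmpty := by
      simp [List.isEmpty_iff]; intro he; simp [he] at h
    simp [hne]
  · have hlen : ¬ (6 ≤ s.length) := by rw [String.length_toList] at h; exact h
    simp [hlen]

def contAt (lines : List String) (j : Nat) : Bool := isContB (lines.getD j "")

theorem crA_inner_ge (lines : List String) (fuel e : Nat) : e ≤ crA_inner lines fuel e := by
  induction fuel generalizing e with
  | zero => simp [crA_inner]
  | succ f ih =>
      simp only [crA_inner]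
      split_ifs with h1 h2
      · exact le_trans (by omega) (ih (e + 1))
      · exact le_refl e
      · exact le_refl e

theorem crA_inner_lt (lines : List String) (fuel e : Nat) (h : e < lines.length) :
    crA_inner lines fuel e < lines.length := by
  induction fuel generalizing e with
  | zero => simpa [crA_inner]
  | succ f ih =>
      simp only [crA_inner]
      split_ifs with h1 h2
      · exact ih (e + 1) h1
      · exact h
      · exact h

theorem crA_inner_cont (lines : List String) (fuel e j : Nat) (h1 : e < j)
    (h2 : j ≤ crA_inner lines fuel e) : contAt lines j = true := by
  induction fuel generalizing e with
  | zero => simp [crA_inner] at h2; omega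
  | succ f ih =>
      simp only [crA_inner] at h2
      split_ifs at h2 with hl hc
      · by_cases hje : j = e + 1
        · subst hje
          simpa [contAt, ← isContA_eq_isContB, List.getD] using hc
        · exact ih (e + 1) (by omega) h2
      · omega
      · omega

theorem crA_inner_stop (lines : List String) (fuel e : Nat)
    (hf : lines.length ≤ fuel + e + 1)
    (h : crA_inner lines fuel e + 1 < lines.length) :
    contAt lines (crA_inner lines fuel e + 1) = false := by
  induction fuel generalizing e with
  | zero => simp [crA_inner] at h; omega
  | succ f ih =>
      simp only [crA_inner] at h ⊢
      split_ifs at h ⊢ with hl hc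
      · exact ih (e + 1) (by omega) h
      · simpa [contAt, ← isContA_eq_isContB, List.getD] using hc
      · omega

-- B's pairing pass, as a function of the start-index list
def zipPair (n : Nat) (starts : List Nat) : List (Int × Int) :=
  (starts.zip (starts.tail ++ [n])).map (fun p => ((p.1 : Int) + 1, (p.2 : Int)))

-- the start-index list from position i on
def startsFrom (lines : List String) (i : Nat) : List Nat :=
  i :: (List.range' (i + 1) (lines.length - 1 - i)).filter (fun j => !contAt lines j)

theorem crA_outer_eq (lines : List String) (fuel i : Nat) (h : i < lines.length)
    (hf : lines.length ≤ fuel + i) :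
    crA_outer lines fuel i = zipPair lines.length (startsFrom lines i) := by
  induction fuel generalizing i with
  | zero => omega
  | succ f ih =>
  have hie : i ≤ crA_inner lines lines.length i := crA_inner_ge lines lines.length i
  have hen : crA_inner lines lines.length i < lines.length := crA_inner_lt lines lines.length i h
  set e := crA_inner lines lines.length i with he
  have hsplit : List.range' (i + 1) (lines.length - 1 - i) =
      List.range' (i + 1) (e - i) ++ List.range' (e + 1) (lines.length - 1 - e) := by
    have h1 : (e - i) + (lines.length - 1 - e) = lines.length - 1 - i := by omega
    have h2 : e + 1 = (i + 1) + (e - i) := by omega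
    rw [← h1, h2]
    exact (List.range'_append_1 ..).symm
  have hfilt1 : (List.range' (i + 1) (e - i)).filter (fun j => !contAt lines j) = [] := by
    rw [List.filter_eq_nil_iff]
    intro j hj
    have := List.mem_range'_1.mp hj
    simp [crA_inner_cont lines lines.length i j (by omega) (by omega)]
  rw [crA_outer]
  simp only [if_pos h]
  show ((i : Int) + 1, (e : Int) + 1) :: crA_outer lines f (e + 1) = zipPair lines.length (startsFrom lines i)
  by_cases hend : e + 1 = lines.length
  · have hr2 : List.range' (e + 1) (lines.length - 1 - e) = [] := by
      have h0 : lines.length - 1 - e = 0 := by omega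
      simp [h0]
    have hnil : crA_outer lines f (e + 1) = [] := by
      cases f with
      | zero => rfl
      | succ f' => simp [crA_outer, hend]
    rw [hnil]
    unfold startsFrom zipPair
    rw [hsplit, List.filter_append, hfilt1, hr2]
    simp
    omega
  · have hlt : e + 1 < lines.length := by omega
    have hstop : contAt lines (e + 1) = false :=
      crA_inner_stop lines lines.length i (by omega) hlt
    have hr2 : List.range' (e + 1) (lines.length - 1 - e) =
        (e + 1) :: List.range' (e + 2) (lines.length - 1 - (e + 1)) := by
      have h1 : lines.length - 1 - e = (lines.length - 1 - (e + 1)) + 1 := by omega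
      rw [h1, List.range'_succ]
    have hrec : crA_outer lines f (e + 1) = zipPair lines.length (startsFrom lines (e + 1)) :=
      ih (e + 1) hlt (by omega)
    rw [hrec]
    unfold startsFrom zipPair
    rw [hsplit, List.filter_append, hfilt1, hr2]
    simp [hstop]

-- ===== VERDICT (by name: the statement is the Claim_ definition above) =====
theorem continuation_ranges_spec : Claim_equal_continuation_ranges := by
  intro lines _
  unfold Spec_continuation_ranges continuation_ranges continuation_ranges_alt
  by_cases h : lines.length = 0
  · rw [crA_outer.eq_def]
    cases hl : lines.length with
    | zero => simp
    | succ k => omega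
  · have h0 : 0 < lines.length := Nat.pos_of_ne_zero h
    rw [crA_outer_eq lines lines.length 0 h0 (by omega), if_neg h]
    rfl
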